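-- pv_equiv track=rewrite | github.com/tlhclk/smid.demo | smidBeta/lol.py | number_needed
-- ===== SOURCE A (Python) =====
-- def number_needed(a,b):
--     a,b=a.lower(),b.lower()
--     dict_a={}
--     dict_b={}
--     for l in a:
--         if l not in dict_a:
--             dict_a[l]=1
--         else:
--             dict_a[l]+=1
--     for l in b:
--         if l not in dict_b:
--             dict_b[l]=1
--         else:
--             dict_b[l]+=1
--     score=0
--     for l in dict_a:
--         if l not in dict_b:
--             score+=dict_a[l]
--         elif dict_a[l]!=dict_b[l]:
--             score+=abs(dict_a[l]-dict_b[l])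
--     for l in dict_b:
--         if l not in dict_a:
--             score+=dict_b[l]
--     return score
-- ===== SOURCE B (Python) =====
-- def number_needed(a, b):
--     xs = sorted(a.lower())
--     ys = sorted(b.lower())
--     i = j = common = 0
--     while i < len(xs) and j < len(ys):
--         if xs[i] == ys[j]:
--             common += 1
--             i += 1
--             j += 1
--         elif xs[i] < ys[j]:
--             i += 1
--         else:
--             j += 1
--     return len(xs) + len(ys) - 2 * common
-- ===== Notes on version B (the rewrite author's own statement) =====
-- stated objective: alternative
-- what changed: Replaces A's two hash frequency tables and two key-comparison passes with a sort-and-merge algorithm: sort both lowered strings, count the size of the multiset intersection with a two-pointer merge scan, and return len(a)+len(b)-2*common.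
import Mathlib
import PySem

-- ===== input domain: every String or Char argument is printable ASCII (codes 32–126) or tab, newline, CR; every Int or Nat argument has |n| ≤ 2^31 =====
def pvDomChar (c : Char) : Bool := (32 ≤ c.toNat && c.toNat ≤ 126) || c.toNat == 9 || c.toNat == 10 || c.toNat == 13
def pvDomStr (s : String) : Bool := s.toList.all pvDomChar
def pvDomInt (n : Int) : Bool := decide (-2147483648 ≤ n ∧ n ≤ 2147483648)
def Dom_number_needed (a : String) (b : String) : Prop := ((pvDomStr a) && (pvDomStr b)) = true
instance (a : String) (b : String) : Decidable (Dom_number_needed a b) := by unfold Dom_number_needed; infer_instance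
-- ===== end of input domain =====

-- B replaces A's two hash frequency tables and two key-comparison passes with a sort-and-merge
-- algorithm: sort both lowered strings, count the multiset intersection with a two-pointer scan,
-- and return len(a)+len(b)-2*common (objective: alternative).

-- ===== PORT A =====
def number_needed (a : String) (b : String) : Int :=
  let la := (PySem.Str.lower a).toList
  let lb := (PySem.Str.lower b).toList
  let dict_a := la.foldl
    (fun d l => if d.contains l = false then d.insert l 1 else d.modify l 0 (· + 1))
    (PySem.Dict.empty : PySem.Dict Char Int)
  let dict_b := lb.foldl
    (fun d l => if d.contains l = false then d.insert l 1 else d.modify l 0 (· + 1))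
    (PySem.Dict.empty : PySem.Dict Char Int)
  let score := dict_a.keys.foldl
    (fun score l =>
      if dict_b.contains l = false then score + dict_a.getD l 0
      else if dict_a.getD l 0 ≠ dict_b.getD l 0 then score + |dict_a.getD l 0 - dict_b.getD l 0|
      else score) (0 : Int)
  dict_b.keys.foldl
    (fun score l => if dict_a.contains l = false then score + dict_b.getD l 0 else score) score

-- ===== PORT B =====
-- Source B's while loop over indices i, j with accumulator `common`, as the obvious structural
-- recursion over the two remaining suffixes carrying the same accumulator.
def nnMerge : List Char → List Char → Nat → Nat
  | x :: xs, y :: ys, common =>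
      if x = y then nnMerge xs ys (common + 1)
      else if x < y then nnMerge xs (y :: ys) common
      else nnMerge (x :: xs) ys common
  | _, _, common => common
termination_by xs ys _ => xs.length + ys.length
decreasing_by all_goals (simp only [List.length_cons]; omega)

def number_needed_alt (a : String) (b : String) : Int :=
  let xs := PySem.List.sorted (PySem.Str.lower a).toList (fun c => c) false
  let ys := PySem.List.sorted (PySem.Str.lower b).toList (fun c => c) false
  (xs.length : Int) + ys.length - 2 * nnMerge xs ys 0

-- ===== PRECONDITION & SPEC =====
def Spec_number_needed (a : String) (b : String) (out : Int) : Prop := out = number_needed_alt a b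
instance (a : String) (b : String) (out : Int) : Decidable (Spec_number_needed a b out) := by unfold Spec_number_needed; infer_instance

-- ===== CLAIM (what is proved, stated in full; the proofs are below) =====
def Claim_equal_number_needed : Prop := ∀ (a : String) (b : String), Dom_number_needed a b → Spec_number_needed a b (number_needed a b)

-- ===== LEMMAS AND PROOFS =====

-- A's counting loop: lookups are the occurrence counts.
theorem getD_afold (l : List Char) (d : PySem.Dict Char Int) (v : Char) :
    (l.foldl (fun d l => if d.contains l = false then d.insert l 1 else d.modify l 0 (· + 1)) d).getD v 0
      = d.getD v 0 + l.count v := by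
  induction l generalizing d with
  | nil => simp
  | cons x xs ih =>
      simp only [List.foldl_cons, ih, List.count_cons]
      by_cases hc : d.contains x = false
      · rw [if_pos hc]
        by_cases hv : v = x
        · subst hv
          rw [PySem.Dict.getD_insert_self, PySem.Dict.getD_of_not_contains d 0 hc]
          simp
          omega
        · rw [PySem.Dict.getD_insert_of_ne _ _ _ hv]
          simp [beq_iff_eq, Ne.symm hv]
      · rw [if_neg hc]
        by_cases hv : v = x
        · subst hv
          rw [PySem.Dict.getD_modify_self]
          simp
          omega
        · rw [PySem.Dict.getD_modify_of_ne _ _ _ hv]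
          simp [beq_iff_eq, Ne.symm hv]

-- A's counting loop: keys are the distinct characters in first-occurrence order.
theorem keys_afold (l : List Char) (d : PySem.Dict Char Int) :
    (l.foldl (fun d l => if d.contains l = false then d.insert l 1 else d.modify l 0 (· + 1)) d).keys
      = PySem.Set.update d.keys l := by
  induction l generalizing d with
  | nil => simp [PySem.Set.update_nil]
  | cons x xs ih =>
      simp only [List.foldl_cons, ih, PySem.Set.update_cons]
      by_cases hc : d.contains x = false
      · rw [if_pos hc, PySem.Dict.keys_insert_of_not_contains _ _ hc,
            PySem.Set.add_of_not_mem (fun hm => by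
              rw [← PySem.Dict.contains_iff_mem_keys] at hm
              simp [hc] at hm)]
      · have hc' : d.contains x = true := by simpa using hc
        rw [if_neg hc, PySem.Dict.keys_modify, PySem.Dict.keys_insert_of_contains _ _ hc',
            PySem.Set.add_of_mem ((PySem.Dict.contains_iff_mem_keys d x).mp hc')]

-- an accumulating branch fold is init + the sum of the per-element contributions
theorem foldl_sum_g (l : List Char) (g : Char → Int) (f : Int → Char → Int)
    (hf : ∀ s c, f s c = s + g c) (s : Int) :
    l.foldl f s = s + (l.map g).sum := by
  induction l generalizing s with
  | nil => simp
  | cons x xs ih =>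
      simp only [List.foldl_cons, List.map_cons, List.sum_cons, ih, hf]
      ring

-- a conditional contribution sums over the filtered list
theorem sum_map_ite_filter (l : List Char) (p : Char → Bool) (f : Char → Int) :
    (l.map (fun c => if p c = true then f c else 0)).sum = ((l.filter p).map f).sum := by
  induction l with
  | nil => simp
  | cons x xs ih =>
      by_cases h : p x = true
      · simp [h, ih]
      · simp [h, ih]

-- A, on the lowered character lists, is the sum of |count_a - count_b| over the distinct characters.
theorem A_eq_hsum (la lb : List Char) :
    ((lb.foldl
        (fun d l => if d.contains l = false then d.insert l 1 else d.modify l 0 (· + 1))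
        (PySem.Dict.empty : PySem.Dict Char Int)).keys.foldl
      (fun score l =>
        if (la.foldl
              (fun d l => if d.contains l = false then d.insert l 1 else d.modify l 0 (· + 1))
              (PySem.Dict.empty : PySem.Dict Char Int)).contains l = false
        then score + (lb.foldl
              (fun d l => if d.contains l = false then d.insert l 1 else d.modify l 0 (· + 1))
              (PySem.Dict.empty : PySem.Dict Char Int)).getD l 0
        else score)
      ((la.foldl
          (fun d l => if d.contains l = false then d.insert l 1 else d.modify l 0 (· + 1))
          (PySem.Dict.empty : PySem.Dict Char Int)).keys.foldl
        (fun score l =>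
          if (lb.foldl
                (fun d l => if d.contains l = false then d.insert l 1 else d.modify l 0 (· + 1))
                (PySem.Dict.empty : PySem.Dict Char Int)).contains l = false
          then score + (la.foldl
                (fun d l => if d.contains l = false then d.insert l 1 else d.modify l 0 (· + 1))
                (PySem.Dict.empty : PySem.Dict Char Int)).getD l 0
          else if (la.foldl
                (fun d l => if d.contains l = false then d.insert l 1 else d.modify l 0 (· + 1))
                (PySem.Dict.empty : PySem.Dict Char Int)).getD l 0
              ≠ (lb.foldl
                (fun d l => if d.contains l = false then d.insert l 1 else d.modify l 0 (· + 1))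
                (PySem.Dict.empty : PySem.Dict Char Int)).getD l 0
          then score + |(la.foldl
                (fun d l => if d.contains l = false then d.insert l 1 else d.modify l 0 (· + 1))
                (PySem.Dict.empty : PySem.Dict Char Int)).getD l 0
              - (lb.foldl
                (fun d l => if d.contains l = false then d.insert l 1 else d.modify l 0 (· + 1))
                (PySem.Dict.empty : PySem.Dict Char Int)).getD l 0|
          else score) (0 : Int)))
    = ((PySem.Set.update (PySem.Set.ofList la) lb).map
        (fun c => |(la.count c : Int) - lb.count c|)).sum := by
  set da := la.foldl
    (fun d l => if d.contains l = false then d.insert l 1 else d.modify l 0 (· + 1))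
    (PySem.Dict.empty : PySem.Dict Char Int) with hda
  set db := lb.foldl
    (fun d l => if d.contains l = false then d.insert l 1 else d.modify l 0 (· + 1))
    (PySem.Dict.empty : PySem.Dict Char Int) with hdb
  set h : Char → Int := fun v => |(la.count v : Int) - lb.count v| with hh
  have hga : ∀ v, da.getD v 0 = la.count v := fun v => by
    rw [hda, getD_afold]; simp
  have hgb : ∀ v, db.getD v 0 = lb.count v := fun v => by
    rw [hdb, getD_afold]; simp
  have hka : da.keys = PySem.Set.ofList la := by
    rw [hda, keys_afold, PySem.Dict.keys_empty, PySem.Set.update_nil_left]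
  have hkb : db.keys = PySem.Set.ofList lb := by
    rw [hdb, keys_afold, PySem.Dict.keys_empty, PySem.Set.update_nil_left]
  have hca : ∀ v, da.contains v = la.contains v := fun v => by
    rw [PySem.Dict.contains_eq_decide_mem_keys, hka]
    simp [PySem.Set.mem_ofList]
  have hcb : ∀ v, db.contains v = lb.contains v := fun v => by
    rw [PySem.Dict.contains_eq_decide_mem_keys, hkb]
    simp [PySem.Set.mem_ofList]
  have pass1 : ∀ (s : Int), da.keys.foldl
      (fun score l =>
        if db.contains l = false then score + da.getD l 0
        else if da.getD l 0 ≠ db.getD l 0 then score + |da.getD l 0 - db.getD l 0|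
        else score) s
      = s + (da.keys.map (fun c =>
          if db.contains c = false then da.getD c 0
          else if da.getD c 0 ≠ db.getD c 0 then |da.getD c 0 - db.getD c 0| else 0)).sum :=
    fun s => foldl_sum_g _ _ _
      (fun s c => by
        by_cases h1 : db.contains c = false
        · rw [if_pos h1, if_pos h1]
        · by_cases h2 : da.getD c 0 ≠ db.getD c 0
          · rw [if_neg h1, if_neg h1, if_pos h2, if_pos h2]
          · rw [if_neg h1, if_neg h1, if_neg h2, if_neg h2]; ring) s
  have hmap1 : da.keys.map (fun c =>
        if db.contains c = false then da.getD c 0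
        else if da.getD c 0 ≠ db.getD c 0 then |da.getD c 0 - db.getD c 0| else 0)
      = da.keys.map h := by
    apply List.map_congr_left
    intro c _
    rw [hga, hgb, hcb, hh]
    by_cases hm : lb.contains c = false
    · have h0 : lb.count c = 0 := by
        rw [List.count_eq_zero]
        simpa using hm
      rw [if_pos hm]
      simp [h0, abs_of_nonneg (by positivity : (0:Int) ≤ (la.count c : Int))]
    · by_cases he : (la.count c : Int) ≠ lb.count c
      · rw [if_neg hm, if_pos he]
      · rw [if_neg hm, if_neg he]
        simp [not_not.mp he]
  have pass2 : ∀ (s : Int), db.keys.foldl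
      (fun score l => if da.contains l = false then score + db.getD l 0 else score) s
      = s + (db.keys.map (fun c => if (!la.contains c) = true then db.getD c 0 else 0)).sum :=
    fun s => foldl_sum_g _ _ _
      (fun s c => by
        by_cases h1 : da.contains c = false
        · have h1' : (!la.contains c) = true := by rw [← hca]; simp [h1]
          rw [if_pos h1, if_pos h1']
        · have h1' : ¬ (!la.contains c) = true := by rw [← hca]; simpa using h1
          rw [if_neg h1, if_neg h1']; ring) s
  have hmap2 : (db.keys.filter (fun c => !la.contains c)).map (fun c => db.getD c 0)
      = (db.keys.filter (fun c => !la.contains c)).map h := by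
    apply List.map_congr_left
    intro c hc
    rw [List.mem_filter] at hc
    have h0 : la.count c = 0 := by
      rw [List.count_eq_zero]
      simpa using hc.2
    rw [hgb]
    simp only [hh, h0]
    simp
  rw [pass1, pass2, sum_map_ite_filter, hmap1, hmap2, hka, hkb,
      PySem.Set.update_eq_append_filter, List.map_append, List.sum_append]
  have hfeq : List.filter (fun y => !(PySem.Set.ofList la).contains y) (PySem.Set.ofList lb)
      = List.filter (fun c => !la.contains c) (PySem.Set.ofList lb) := by
    apply List.filter_congr
    intro c _
    simp [PySem.Set.contains_eq_listContains, PySem.Set.mem_ofList]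
  rw [hfeq]
  ring

-- B's merge scan on sorted lists counts the multiset intersection.
theorem nnMerge_eq_card_inter (xs ys : List Char) (c : Nat)
    (hx : xs.Pairwise (· ≤ ·)) (hy : ys.Pairwise (· ≤ ·)) :
    nnMerge xs ys c = c + Multiset.card ((↑xs : Multiset Char) ∩ ↑ys) := by
  fun_induction nnMerge xs ys c with
  | case1 xs y ys common ih =>
      rw [ih hx.of_cons hy.of_cons]
      rw [show ((↑(y :: xs) : Multiset Char)) = y ::ₘ ↑xs from rfl,
          show ((↑(y :: ys) : Multiset Char)) = y ::ₘ ↑ys from rfl,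
          ← Multiset.cons_inter_distrib, Multiset.card_cons]
      omega
  | case2 x xs y ys common hne hlt ih =>
      rw [ih hx.of_cons hy]
      have hnm : x ∉ (↑(y :: ys) : Multiset Char) := by
        simp only [Multiset.mem_coe, List.mem_cons]
        rintro (rfl | hm)
        · exact hne rfl
        · exact absurd hlt (not_lt.mpr ((List.pairwise_cons.mp hy).1 x hm))
      conv_rhs => rw [show ((↑(x :: xs) : Multiset Char)) = x ::ₘ ↑xs from rfl]
      rw [Multiset.cons_inter_of_neg _ hnm]
  | case3 x xs y ys common hne hnlt ih =>
      rw [ih hx hy.of_cons]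
      have hyx : y < x := lt_of_le_of_ne (not_lt.mp hnlt) (fun h => hne h.symm)
      have hnm : y ∉ (↑(x :: xs) : Multiset Char) := by
        simp only [Multiset.mem_coe, List.mem_cons]
        rintro (rfl | hm)
        · exact hne rfl
        · exact absurd hyx (not_lt.mpr ((List.pairwise_cons.mp hx).1 y hm))
      conv_rhs => rw [Multiset.inter_comm, show ((↑(y :: ys) : Multiset Char)) = y ::ₘ ↑ys from rfl,
        Multiset.cons_inter_of_neg _ hnm, Multiset.inter_comm]
  | case4 xs ys common h =>
      rcases xs with _ | ⟨x, xs⟩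
      · simp
      · rcases ys with _ | ⟨y, ys⟩
        · simp
        · exact (h x xs y ys rfl rfl).elim

-- the multiset-intersection size as a sum of per-character minimum counts over any covering finset
theorem card_inter_sum (xs ys : List Char) (T : Finset Char) (hT : ∀ c ∈ xs, c ∈ T) :
    Multiset.card ((↑xs : Multiset Char) ∩ ↑ys) = ∑ c ∈ T, min (xs.count c) (ys.count c) := by
  rw [← Multiset.toFinset_sum_count_eq ((↑xs : Multiset Char) ∩ ↑ys)]
  rw [Finset.sum_subset (fun a ha => by
        rw [Multiset.mem_toFinset, Multiset.mem_inter] at ha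
        exact hT a (Multiset.mem_coe.mp ha.1))
      (fun a _ ha => by
        rw [Multiset.mem_toFinset] at ha
        exact Multiset.count_eq_zero.mpr ha)]
  apply Finset.sum_congr rfl
  intro a _
  rw [Multiset.count_inter, Multiset.coe_count, Multiset.coe_count]

-- a list's length as the sum of its counts over any covering finset
theorem length_eq_sum_count (xs : List Char) (T : Finset Char) (hT : ∀ c ∈ xs, c ∈ T) :
    xs.length = ∑ c ∈ T, xs.count c := by
  rw [← List.sum_toFinset_count_eq_length xs]
  exact Finset.sum_subset (fun a ha => hT a (List.mem_toFinset.mp ha))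
    (fun a _ ha => List.count_eq_zero_of_not_mem (fun hm => ha (List.mem_toFinset.mpr hm)))

-- the heart of the equivalence, stated on the lowered character lists
theorem core_eq (la lb : List Char) :
    ((PySem.Set.update (PySem.Set.ofList la) lb).map
        (fun c => |(la.count c : Int) - lb.count c|)).sum
      = ((PySem.List.sorted la (fun c => c) false).length : Int)
        + (PySem.List.sorted lb (fun c => c) false).length
        - 2 * nnMerge (PySem.List.sorted la (fun c => c) false)
            (PySem.List.sorted lb (fun c => c) false) 0 := by
  set S := PySem.Set.update (PySem.Set.ofList la) lb with hS
  set sla := PySem.List.sorted la (fun c => c) false with hsla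
  set slb := PySem.List.sorted lb (fun c => c) false with hslb
  have hpa : sla.Perm la := PySem.List.sorted_perm la (fun c => c) false
  have hpb : slb.Perm lb := PySem.List.sorted_perm lb (fun c => c) false
  have hnd : S.Nodup := PySem.Set.nodup_update _ _ (PySem.Set.nodup_ofList la)
  have hTla : ∀ c ∈ la, c ∈ S.toFinset := fun c hc => by
    rw [List.mem_toFinset, hS, PySem.Set.mem_update, PySem.Set.mem_ofList]
    exact Or.inl hc
  have hTsla : ∀ c ∈ sla, c ∈ S.toFinset := fun c hc => hTla c (hpa.mem_iff.mp hc)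
  have hTlb : ∀ c ∈ lb, c ∈ S.toFinset := fun c hc => by
    rw [List.mem_toFinset, hS, PySem.Set.mem_update]
    exact Or.inr hc
  have hmc : nnMerge sla slb 0
      = ∑ c ∈ S.toFinset, min (la.count c) (lb.count c) := by
    rw [nnMerge_eq_card_inter sla slb 0
          (by simpa using PySem.List.sorted_pairwise la (fun c => c))
          (by simpa using PySem.List.sorted_pairwise lb (fun c => c)),
        card_inter_sum sla slb S.toFinset hTsla]
    simp only [Nat.zero_add]
    apply Finset.sum_congr rfl
    intro c _
    rw [hpa.count_eq, hpb.count_eq]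
  rw [← List.sum_toFinset _ hnd]
  rw [show sla.length = la.length from hpa.length_eq,
      show slb.length = lb.length from hpb.length_eq,
      length_eq_sum_count la S.toFinset hTla, length_eq_sum_count lb S.toFinset hTlb, hmc]
  push_cast
  rw [← Finset.sum_add_distrib, Finset.mul_sum, ← Finset.sum_sub_distrib]
  apply Finset.sum_congr rfl
  intro c _
  rcases le_total ((la.count c : Int)) ((lb.count c : Int)) with h | h
  · rw [abs_of_nonpos (by omega), min_eq_left h]; ring
  · rw [abs_of_nonneg (by omega), min_eq_right h]; ring

-- ===== VERDICT (by name: the statement is the Claim_ definition above) =====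
theorem number_needed_spec : Claim_equal_number_needed := by
  intro a b _
  unfold Spec_number_needed number_needed number_needed_alt
  exact (A_eq_hsum (PySem.Str.lower a).toList (PySem.Str.lower b).toList).trans
    (core_eq (PySem.Str.lower a).toList (PySem.Str.lower b).toList)
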